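-- pv_equiv track=rewrite | github.com/battalion-energy/ai_knowledgebase | gis/extract_pdf_data.py | parse_state_policies
-- ===== SOURCE A (Python) =====
-- from typing import Dict, List, Any
--
-- STATE_ABBR = {
--     'AL': 'Alabama', 'AK': 'Alaska', 'AZ': 'Arizona', 'AR': 'Arkansas',
--     'CA': 'California', 'CO': 'Colorado', 'CT': 'Connecticut', 'DE': 'Delaware',
--     'FL': 'Florida', 'GA': 'Georgia', 'HI': 'Hawaii', 'ID': 'Idaho',
--     'IL': 'Illinois', 'IN': 'Indiana', 'IA': 'Iowa', 'KS': 'Kansas',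
--     'KY': 'Kentucky', 'LA': 'Louisiana', 'ME': 'Maine', 'MD': 'Maryland',
--     'MA': 'Massachusetts', 'MI': 'Michigan', 'MN': 'Minnesota', 'MS': 'Mississippi',
--     'MO': 'Missouri', 'MT': 'Montana', 'NE': 'Nebraska', 'NV': 'Nevada',
--     'NH': 'New Hampshire', 'NJ': 'New Jersey', 'NM': 'New Mexico', 'NY': 'New York',
--     'NC': 'North Carolina', 'ND': 'North Dakota', 'OH': 'Ohio', 'OK': 'Oklahoma',
--     'OR': 'Oregon', 'PA': 'Pennsylvania', 'RI': 'Rhode Island', 'SC': 'South Carolina',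
--     'SD': 'South Dakota', 'TN': 'Tennessee', 'TX': 'Texas', 'UT': 'Utah',
--     'VT': 'Vermont', 'VA': 'Virginia', 'WA': 'Washington', 'WV': 'West Virginia',
--     'WI': 'Wisconsin', 'WY': 'Wyoming', 'DC': 'District of Columbia',
--     'PR': 'Puerto Rico', 'VI': 'Virgin Islands', 'GU': 'Guam'
-- }
--
-- def parse_state_policies(text: str, policy_type: str) -> Dict[str, Any]:
--     """Parse state-specific policy information from extracted text."""
--     state_data = {}
--
--     # Try to identify states and their associated policies
--     lines = text.split('\n')
--     current_state = None
--     current_policy = []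
--
--     for line in lines:
--         # Check if line contains a state name or abbreviation
--         for abbr, full_name in STATE_ABBR.items():
--             if abbr in line or full_name in line:
--                 # Save previous state data if exists
--                 if current_state and current_policy:
--                     policy_text = ' '.join(current_policy).strip()
--                     if policy_text:
--                         state_data[current_state] = {
--                             'policy_type': policy_type,
--                             'policy_details': policy_text[:500]  # Limit to 500 chars
--                         }
--
--                 current_state = full_name
--                 current_policy = [line]
--                 break
--         else:
--             # Add to current state policy if we have an active state
--             if current_state and line.strip():
--                 current_policy.append(line.strip())
--
--     # Save last state data
--     if current_state and current_policy:
--         policy_text = ' '.join(current_policy).strip()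
--         if policy_text:
--             state_data[current_state] = {
--                 'policy_type': policy_type,
--                 'policy_details': policy_text[:500]
--             }
--
--     return state_data
-- ===== SOURCE B (Python) =====
-- from typing import Dict, Any
--
-- STATE_ABBR = {
--     'AL': 'Alabama', 'AK': 'Alaska', 'AZ': 'Arizona', 'AR': 'Arkansas',
--     'CA': 'California', 'CO': 'Colorado', 'CT': 'Connecticut', 'DE': 'Delaware',
--     'FL': 'Florida', 'GA': 'Georgia', 'HI': 'Hawaii', 'ID': 'Idaho',
--     'IL': 'Illinois', 'IN': 'Indiana', 'IA': 'Iowa', 'KS': 'Kansas',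
--     'KY': 'Kentucky', 'LA': 'Louisiana', 'ME': 'Maine', 'MD': 'Maryland',
--     'MA': 'Massachusetts', 'MI': 'Michigan', 'MN': 'Minnesota', 'MS': 'Mississippi',
--     'MO': 'Missouri', 'MT': 'Montana', 'NE': 'Nebraska', 'NV': 'Nevada',
--     'NH': 'New Hampshire', 'NJ': 'New Jersey', 'NM': 'New Mexico', 'NY': 'New York',
--     'NC': 'North Carolina', 'ND': 'North Dakota', 'OH': 'Ohio', 'OK': 'Oklahoma',
--     'OR': 'Oregon', 'PA': 'Pennsylvania', 'RI': 'Rhode Island', 'SC': 'South Carolina',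
--     'SD': 'South Dakota', 'TN': 'Tennessee', 'TX': 'Texas', 'UT': 'Utah',
--     'VT': 'Vermont', 'VA': 'Virginia', 'WA': 'Washington', 'WV': 'West Virginia',
--     'WI': 'Wisconsin', 'WY': 'Wyoming', 'DC': 'District of Columbia',
--     'PR': 'Puerto Rico', 'VI': 'Virgin Islands', 'GU': 'Guam'
-- }
--
-- def parse_state_policies(text: str, policy_type: str) -> Dict[str, Any]:
--     """Index-based rewrite: locate all header lines up front, then render each
--     block by slicing the line array between consecutive header positions."""
--     lines = text.split('\n')
--
--     def header(line):
--         return next((full for abbr, full in STATE_ABBR.items()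
--                      if abbr in line or full in line), None)
--
--     # Pass 1: positions of all header lines, with the raw line and its state.
--     headers = [(i, line, st) for i, line in enumerate(lines)
--                if (st := header(line)) is not None]
--     # Each block ends where the next header starts (the last one at len(lines)).
--     ends = [i for i, _, _ in headers[1:]] + [len(lines)]
--
--     # Pass 2: render each block from a slice of the line array.
--     state_data = {}
--     for (start, line, st), end in zip(headers, ends):
--         parts = [line] + [s for s in (l.strip() for l in lines[start + 1:end]) if s]
--         t = ' '.join(parts).strip()
--         if t:
--             state_data[st] = {'policy_type': policy_type,
--                               'policy_details': t[:500]}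
--     return state_data
-- ===== Notes on version B (the rewrite author's own statement) =====
-- stated objective: alternative
-- what changed: Replaces A's stateful streaming loop (current_state/current_policy with flush-on-header and a trailing flush) by an index-based two-pass algorithm: first compute the positions of all header lines, then render each block by slicing the line array between consecutive header positions; no running block accumulator exists in B.
import Mathlib
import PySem

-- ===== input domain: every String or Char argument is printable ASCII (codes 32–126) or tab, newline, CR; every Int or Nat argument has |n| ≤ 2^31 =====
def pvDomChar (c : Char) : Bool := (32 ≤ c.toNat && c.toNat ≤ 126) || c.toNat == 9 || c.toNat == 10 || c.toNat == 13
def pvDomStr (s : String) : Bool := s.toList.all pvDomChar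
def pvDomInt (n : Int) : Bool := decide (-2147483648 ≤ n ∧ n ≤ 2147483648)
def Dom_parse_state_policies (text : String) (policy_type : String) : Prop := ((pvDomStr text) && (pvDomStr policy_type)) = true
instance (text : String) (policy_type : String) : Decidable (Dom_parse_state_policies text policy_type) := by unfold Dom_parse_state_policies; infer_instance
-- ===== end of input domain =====

-- B replaces A's stateful streaming loop by an index-based two-pass algorithm (locate header positions, then slice each block out of the line array); return values proved equal.


-- ===== PORT A =====
def pvSTATE_ABBR : List (String × String) := [
  ("AL", "Alabama"), ("AK", "Alaska"), ("AZ", "Arizona"), ("AR", "Arkansas"),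
  ("CA", "California"), ("CO", "Colorado"), ("CT", "Connecticut"), ("DE", "Delaware"),
  ("FL", "Florida"), ("GA", "Georgia"), ("HI", "Hawaii"), ("ID", "Idaho"),
  ("IL", "Illinois"), ("IN", "Indiana"), ("IA", "Iowa"), ("KS", "Kansas"),
  ("KY", "Kentucky"), ("LA", "Louisiana"), ("ME", "Maine"), ("MD", "Maryland"),
  ("MA", "Massachusetts"), ("MI", "Michigan"), ("MN", "Minnesota"), ("MS", "Mississippi"),
  ("MO", "Missouri"), ("MT", "Montana"), ("NE", "Nebraska"), ("NV", "Nevada"),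
  ("NH", "New Hampshire"), ("NJ", "New Jersey"), ("NM", "New Mexico"), ("NY", "New York"),
  ("NC", "North Carolina"), ("ND", "North Dakota"), ("OH", "Ohio"), ("OK", "Oklahoma"),
  ("OR", "Oregon"), ("PA", "Pennsylvania"), ("RI", "Rhode Island"), ("SC", "South Carolina"),
  ("SD", "South Dakota"), ("TN", "Tennessee"), ("TX", "Texas"), ("UT", "Utah"),
  ("VT", "Vermont"), ("VA", "Virginia"), ("WA", "Washington"), ("WV", "West Virginia"),
  ("WI", "Wisconsin"), ("WY", "Wyoming"), ("DC", "District of Columbia"),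
  ("PR", "Puerto Rico"), ("VI", "Virgin Islands"), ("GU", "Guam")]

-- A's inner 'for abbr, full_name in STATE_ABBR.items(): … break' loop
def pvScanA (line : String) : List (String × String) → Option String
  | [] => none
  | (abbr, full) :: rest =>
    if PySem.Str.isIn abbr line || PySem.Str.isIn full line then some full
    else pvScanA line rest

-- A's 'save previous state data' block (also used for the final save)
def pvSaveA (policy_type : String) (d : PySem.Dict String (List (String × String)))
    (cur : Option String) (pol : List String) : PySem.Dict String (List (String × String)) :=
  match cur with
  | none => d
  | some s =>
    if pol ≠ [] then
      let t := PySem.Str.strip (PySem.Str.join " " pol)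
      if t ≠ "" then
        d.insert s [("policy_type", policy_type),
                    ("policy_details", PySem.Str.slice t none (some 500))]
      else d
    else d

def pvLoopA (policy_type : String) :
    List String → PySem.Dict String (List (String × String)) → Option String → List String →
    PySem.Dict String (List (String × String))
  | [], d, cur, pol => pvSaveA policy_type d cur pol
  | l :: ls, d, cur, pol =>
    match pvScanA l pvSTATE_ABBR with
    | some full => pvLoopA policy_type ls (pvSaveA policy_type d cur pol) (some full) [l]
    | none =>
      match cur with
      | some s =>
        if PySem.Str.strip l ≠ "" then pvLoopA policy_type ls d (some s) (pol ++ [PySem.Str.strip l])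
        else pvLoopA policy_type ls d (some s) pol
      | none => pvLoopA policy_type ls d none pol

def parse_state_policies (text : String) (policy_type : String) : List (String × List (String × String)) :=
  (pvLoopA policy_type ((PySem.Str.split? text "\n").getD []) PySem.Dict.empty none []).items

-- ===== PORT B =====
-- B's header lookup: next((full for abbr, full in STATE_ABBR.items() if abbr in line or full in line), None)
def pvHeaderB (line : String) : Option String :=
  (pvSTATE_ABBR.find? (fun p => PySem.Str.isIn p.1 line || PySem.Str.isIn p.2 line)).map (·.2)

def parse_state_policies_alt (text : String) (policy_type : String) : List (String × List (String × String)) :=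
  let lines := (PySem.Str.split? text "\n").getD []
  -- headers = [(i, line, st) for i, line in enumerate(lines) if (st := header(line)) is not None]
  let headers := (PySem.List.enumerate lines 0).filterMap
    (fun il => (pvHeaderB il.2).map (fun st => (il.1, il.2, st)))
  -- ends = [i for i, _, _ in headers[1:]] + [len(lines)]
  let ends := (headers.drop 1).map (·.1) ++ [PySem.List.len lines]
  -- for (start, line, st), end in zip(headers, ends): …
  ((headers.zip ends).foldl
    (fun d he =>
      let parts := he.1.2.1 ::
        (((PySem.List.slice lines (some (he.1.1 + 1)) (some he.2)).map PySem.Str.strip).filter (· ≠ ""))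
      let t := PySem.Str.strip (PySem.Str.join " " parts)
      if t ≠ "" then
        d.insert he.1.2.2 [("policy_type", policy_type),
                           ("policy_details", PySem.Str.slice t none (some 500))]
      else d)
    PySem.Dict.empty).items

-- ===== PRECONDITION & SPEC =====
def Spec_parse_state_policies (text : String) (policy_type : String) (out : List (String × List (String × String))) : Prop := out = parse_state_policies_alt text policy_type
instance (text : String) (policy_type : String) (out : List (String × List (String × String))) : Decidable (Spec_parse_state_policies text policy_type out) := by unfold Spec_parse_state_policies; infer_instance

-- ===== CLAIM (what is proved, stated in full; the proofs are below) =====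
def Claim_equal_parse_state_policies : Prop := ∀ (text : String) (policy_type : String), Dom_parse_state_policies text policy_type → Spec_parse_state_policies text policy_type (parse_state_policies text policy_type)

-- ===== LEMMAS AND PROOFS =====

-- B's per-block render step (the body of B's for loop, on an abstract (state, parts) block)
def pvRenderB (policy_type : String) (d : PySem.Dict String (List (String × String)))
    (b : String × List String) : PySem.Dict String (List (String × String)) :=
  let t := PySem.Str.strip (PySem.Str.join " " b.2)
  if t ≠ "" then
    d.insert b.1 [("policy_type", policy_type),
                  ("policy_details", PySem.Str.slice t none (some 500))]
  else d

def pvNoHdr (l : String) : Bool := (pvScanA l pvSTATE_ABBR).isNone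

def pvCleaned (xs : List String) : List String := (xs.map PySem.Str.strip).filter (· ≠ "")

-- the common abstract block list: each block is (state, header line :: cleaned body)
def blocksSpec : List String → List (String × List String)
  | [] => []
  | l :: ls =>
    match pvScanA l pvSTATE_ABBR with
    | none => blocksSpec ls
    | some st => (st, l :: pvCleaned (ls.takeWhile pvNoHdr)) :: blocksSpec (ls.dropWhile pvNoHdr)
termination_by ls => ls.length
decreasing_by
  · simp
  · simpa [Nat.lt_succ_iff] using List.length_dropWhile_le pvNoHdr ls

-- A's pending-block stream (bridge between A's loop and blocksSpec)
def pvBlocksP : List String → Option (String × List String) → List (String × List String)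
  | [], pend => pend.toList
  | l :: ls, pend =>
    match pvScanA l pvSTATE_ABBR with
    | some full => pend.toList ++ pvBlocksP ls (some (full, [l]))
    | none =>
      match pend with
      | some (s, pol) =>
        if PySem.Str.strip l ≠ "" then pvBlocksP ls (some (s, pol ++ [PySem.Str.strip l]))
        else pvBlocksP ls (some (s, pol))
      | none => pvBlocksP ls none

theorem pvScan_eq_find (line : String) (ps : List (String × String)) :
    pvScanA line ps = (ps.find? (fun p => PySem.Str.isIn p.1 line || PySem.Str.isIn p.2 line)).map (·.2) := by
  induction ps with
  | nil => rfl
  | cons p rest ih =>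
    obtain ⟨a, f⟩ := p
    rw [pvScanA, List.find?_cons]
    cases h : (PySem.Str.isIn a line || PySem.Str.isIn f line) with
    | true => rw [if_pos rfl]; rfl
    | false => rw [if_neg (by simp), ih]

theorem pvSave_eq_render (pt : String) (d : PySem.Dict String (List (String × String)))
    (s : String) (pol : List String) :
    pvSaveA pt d (some s) pol = pvRenderB pt d (s, pol) := by
  cases pol with
  | nil =>
    have ht : PySem.Str.strip (PySem.Str.join " " ([] : List String)) = "" := rfl
    simp [pvSaveA, pvRenderB, ht]
  | cons x xs =>
    simp only [pvSaveA, pvRenderB]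
    split_ifs with h1 h2 <;> simp_all

theorem pvLoopA_eq_foldl (pt : String) (ls : List String)
    (pend : Option (String × List String)) (d : PySem.Dict String (List (String × String))) :
    pvLoopA pt ls d (pend.map (·.1)) (match pend with | some p => p.2 | none => []) =
      (pvBlocksP ls pend).foldl (pvRenderB pt) d := by
  induction ls generalizing pend d with
  | nil =>
    cases pend with
    | none => simp [pvLoopA, pvBlocksP, pvSaveA]
    | some p => obtain ⟨s, pol⟩ := p; simpa [pvLoopA, pvBlocksP] using pvSave_eq_render pt d s pol
  | cons l ls ih =>
    cases pend with
    | none =>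
      simp only [pvLoopA, pvBlocksP, Option.map_none, Option.toList]
      cases hs : pvScanA l pvSTATE_ABBR with
      | some full =>
        simpa using ih (some (full, [l])) d
      | none => simpa using ih none d
    | some p =>
      obtain ⟨s, pol⟩ := p
      simp only [pvLoopA, pvBlocksP, Option.map_some, Option.toList]
      cases hs : pvScanA l pvSTATE_ABBR with
      | some full =>
        rw [pvSave_eq_render]
        simpa [List.foldl_cons] using ih (some (full, [l])) (pvRenderB pt d (s, pol))
      | none =>
        by_cases hstrip : PySem.Str.strip l = ""
        · simpa [hstrip] using ih (some (s, pol)) d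
        · simpa [hstrip] using ih (some (s, pol ++ [PySem.Str.strip l])) d

theorem pvCleaned_cons_ne (l : String) (xs : List String) (h : PySem.Str.strip l ≠ "") :
    pvCleaned (l :: xs) = PySem.Str.strip l :: pvCleaned xs := by
  simp only [pvCleaned, List.map_cons, List.filter_cons]
  simp [h]

theorem pvCleaned_cons_eq (l : String) (xs : List String) (h : PySem.Str.strip l = "") :
    pvCleaned (l :: xs) = pvCleaned xs := by
  simp only [pvCleaned, List.map_cons, List.filter_cons]
  simp [h]

theorem pvBlocksP_some (ls : List String) (s : String) (pol : List String) :
    pvBlocksP ls (some (s, pol)) =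
      (s, pol ++ pvCleaned (ls.takeWhile pvNoHdr)) :: blocksSpec (ls.dropWhile pvNoHdr) := by
  induction ls generalizing s pol with
  | nil => simp [pvBlocksP, blocksSpec, pvCleaned]
  | cons l ls ih =>
    cases hs : pvScanA l pvSTATE_ABBR with
    | some full =>
      have hhd : pvNoHdr l = false := by simp [pvNoHdr, hs]
      simp only [pvBlocksP, hs, Option.toList, List.takeWhile_cons, List.dropWhile_cons, hhd]
      rw [ih full [l]]
      simp [blocksSpec, hs, pvCleaned]
    | none =>
      have hhd : pvNoHdr l = true := by simp [pvNoHdr, hs]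
      by_cases hstrip : PySem.Str.strip l = ""
      · rw [List.takeWhile_cons_of_pos hhd, List.dropWhile_cons_of_pos hhd,
            pvCleaned_cons_eq _ _ hstrip,
            show pvBlocksP (l :: ls) (some (s, pol)) = pvBlocksP ls (some (s, pol)) from by
              simp [pvBlocksP, hs, hstrip],
            ih s pol]
      · rw [List.takeWhile_cons_of_pos hhd, List.dropWhile_cons_of_pos hhd,
            pvCleaned_cons_ne _ _ hstrip,
            show pvBlocksP (l :: ls) (some (s, pol)) =
                pvBlocksP ls (some (s, pol ++ [PySem.Str.strip l])) from by
              simp [pvBlocksP, hs, hstrip],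
            ih s (pol ++ [PySem.Str.strip l])]
        simp

theorem pvBlocksP_none (ls : List String) :
    pvBlocksP ls none = blocksSpec ls := by
  induction ls with
  | nil => simp [pvBlocksP, blocksSpec]
  | cons l ls ih =>
    cases hs : pvScanA l pvSTATE_ABBR with
    | some full =>
      simp only [pvBlocksP, hs, Option.toList, List.nil_append]
      rw [pvBlocksP_some]
      simp [blocksSpec, hs]
    | none =>
      simp only [pvBlocksP, hs, ih]
      rw [blocksSpec]
      simp [hs]

-- B-side: the header table with explicit offsets
def pvHdrs : List String → Nat → List (Int × String × String)
  | [], _ => []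
  | l :: ls, k =>
    match pvScanA l pvSTATE_ABBR with
    | some st => ((k : Int), l, st) :: pvHdrs ls (k + 1)
    | none => pvHdrs ls (k + 1)

theorem pvHdrs_eq_enum_filterMap (ls : List String) (k : Nat) :
    (PySem.List.enumerate ls (k : Int)).filterMap
      (fun il => (pvHeaderB il.2).map (fun st => (il.1, il.2, st))) = pvHdrs ls k := by
  induction ls generalizing k with
  | nil => simp [pvHdrs, PySem.List.enumerate_nil]
  | cons l ls ih =>
    rw [PySem.List.enumerate_cons, List.filterMap_cons]
    have hB : pvHeaderB l = pvScanA l pvSTATE_ABBR := (pvScan_eq_find l pvSTATE_ABBR).symm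
    have hk : ((k : Int) + 1) = ((k + 1 : Nat) : Int) := by push_cast; ring
    cases hs : pvScanA l pvSTATE_ABBR with
    | some st =>
      rw [hB, hs, hk, ih (k + 1)]
      simp [pvHdrs, hs]
    | none =>
      rw [hB, hs, hk, ih (k + 1)]
      simp [pvHdrs, hs]

theorem pvHdrs_noHdr_append (pre suf : List String) (k : Nat)
    (h : ∀ l ∈ pre, pvNoHdr l = true) :
    pvHdrs (pre ++ suf) k = pvHdrs suf (k + pre.length) := by
  induction pre generalizing k with
  | nil => simp
  | cons p pre ih =>
    have hp : pvScanA p pvSTATE_ABBR = none := by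
      have := h p (by simp)
      simpa [pvNoHdr, Option.isNone_iff_eq_none] using this
    simp only [List.cons_append, pvHdrs, hp]
    rw [ih (k + 1) (fun l hl => h l (List.mem_cons_of_mem _ hl))]
    congr 1
    simp [List.length_cons]
    omega

-- B's zip-of-headers block list equals blocksSpec (slices taken from the full list L)
theorem pvZip_eq_blocksSpec (n : Nat) :
    ∀ (ls : List String), ls.length ≤ n → ∀ (k : Nat) (L : List String), L.drop k = ls →
    ((pvHdrs ls k).zip (((pvHdrs ls k).drop 1).map (·.1) ++ [PySem.List.len L])).map
      (fun he => (he.1.2.2,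
        he.1.2.1 :: pvCleaned (PySem.List.slice L (some (he.1.1 + 1)) (some he.2)))) =
      blocksSpec ls := by
  induction n with
  | zero =>
    intro ls hlen k L hdrop
    have : ls = [] := List.length_eq_zero_iff.mp (Nat.le_zero.mp hlen)
    subst this
    simp [pvHdrs, blocksSpec]
  | succ n ih =>
    intro ls hlen k L hdrop
    cases ls with
    | nil => simp [pvHdrs, blocksSpec]
    | cons l ls' =>
      have hdrop' : L.drop (k + 1) = ls' := by
        have h0 := congrArg (List.drop 1) hdrop
        rw [List.drop_drop] at h0
        simpa using h0
      cases hs : pvScanA l pvSTATE_ABBR with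
      | none =>
        simp only [pvHdrs, hs, blocksSpec]
        exact ih ls' (by simpa using Nat.lt_succ_iff.mp (Nat.lt_of_lt_of_le (by simp) hlen)) (k + 1) L hdrop'
      | some st =>
        have htwdw : ls'.takeWhile pvNoHdr ++ ls'.dropWhile pvNoHdr = ls' :=
          List.takeWhile_append_dropWhile
        have htw : ∀ x ∈ ls'.takeWhile pvNoHdr, pvNoHdr x = true :=
          fun x hx => List.mem_takeWhile_imp hx
        have hsplit : L.drop (k + 1) = ls'.takeWhile pvNoHdr ++ ls'.dropWhile pvNoHdr := by
          rw [hdrop', htwdw]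
        have hhdrs' : pvHdrs ls' (k + 1) =
            pvHdrs (ls'.dropWhile pvNoHdr) (k + 1 + (ls'.takeWhile pvNoHdr).length) := by
          conv_lhs => rw [← htwdw]
          exact pvHdrs_noHdr_append _ _ _ htw
        have hlen' : ls'.length ≤ n := by simpa using Nat.succ_le_succ_iff.mp hlen
        cases hdw : ls'.dropWhile pvNoHdr with
        | nil =>
          -- last block: slice runs to len(lines)
          have htweq : ls'.takeWhile pvNoHdr = ls' := by
            conv_rhs => rw [← htwdw, hdw, List.append_nil]
          have hslice : PySem.List.slice L (some ((k : Int) + 1)) (some (PySem.List.len L)) = ls' := by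
            rw [PySem.List.len_eq, show ((k : Int) + 1) = (((k + 1 : Nat)) : Int) by push_cast; ring,
              PySem.List.slice_natCast, hdrop']
            have hl := congrArg List.length hdrop'
            simp [List.length_drop] at hl
            exact List.take_of_length_le (by omega)
          simp only [pvHdrs, hs, hhdrs', hdw, pvHdrs]
          simp only [List.drop_succ_cons, List.drop_nil, List.map_nil, List.nil_append,
            List.zip_cons_cons, List.zip_nil_right, List.map_cons, List.map_nil]
          rw [hslice]
          have hbs : blocksSpec (l :: ls') = [(st, l :: pvCleaned ls')] := by
            simp [blocksSpec, hs, hdw, htweq]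
          rw [hbs]
        | cons h rest =>
          have hh : pvNoHdr h = false := by
            have h3 := List.head_dropWhile_not (p := pvNoHdr) (l := ls')
                (by rw [hdw]; exact List.cons_ne_nil _ _)
            simp only [hdw, List.head_cons] at h3
            exact h3
          obtain ⟨st', hst'⟩ : ∃ st', pvScanA h pvSTATE_ABBR = some st' := by
            cases hscan : pvScanA h pvSTATE_ABBR with
            | none => simp [pvNoHdr, hscan] at hh
            | some st' => exact ⟨st', rfl⟩
          have hdropK : L.drop (k + 1 + (ls'.takeWhile pvNoHdr).length) = h :: rest := by
            have h1 : L.drop (k + 1 + (ls'.takeWhile pvNoHdr).length) =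
                (L.drop (k + 1)).drop (ls'.takeWhile pvNoHdr).length := by
              rw [List.drop_drop]
            rw [h1, hsplit, List.drop_left, hdw]
          have hslice1 : PySem.List.slice L (some ((k : Int) + 1))
              (some (((k + 1 + (ls'.takeWhile pvNoHdr).length : Nat)) : Int)) =
              ls'.takeWhile pvNoHdr := by
            rw [show ((k : Int) + 1) = (((k + 1 : Nat)) : Int) by push_cast; ring,
              PySem.List.slice_natCast, hdrop']
            have h2 : k + 1 + (ls'.takeWhile pvNoHdr).length - (k + 1) =
                (ls'.takeWhile pvNoHdr).length := by omega
            rw [h2]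
            calc ls'.take (ls'.takeWhile pvNoHdr).length
                = (ls'.takeWhile pvNoHdr ++ ls'.dropWhile pvNoHdr).take (ls'.takeWhile pvNoHdr).length := by
                  rw [htwdw]
              _ = ls'.takeWhile pvNoHdr := List.take_left
          have hrec := ih (h :: rest)
              (le_trans (by rw [← hdw]; exact List.length_dropWhile_le _ _) hlen')
              (k + 1 + (ls'.takeWhile pvNoHdr).length) L hdropK
          have hexp : pvHdrs (h :: rest) (k + 1 + (ls'.takeWhile pvNoHdr).length) =
              ((((k + 1 + (ls'.takeWhile pvNoHdr).length : Nat)) : Int), h, st') ::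
                pvHdrs rest (k + 1 + (ls'.takeWhile pvNoHdr).length + 1) := by
            simp [pvHdrs, hst']
          rw [hexp] at hrec
          simp only [pvHdrs, hs, hhdrs', hdw, hexp]
          simp only [List.drop_succ_cons, List.drop_zero, List.map_cons, List.cons_append,
            List.zip_cons_cons, List.map_cons]
          rw [hslice1]
          simp only [blocksSpec, hs, hdw]
          refine List.cons_eq_cons.mpr ⟨rfl, ?_⟩
          simpa [blocksSpec, hst'] using hrec

-- ===== VERDICT (by name: the statement is the Claim_ definition above) =====
theorem parse_state_policies_spec : Claim_equal_parse_state_policies := by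
  intro text policy_type _
  unfold Spec_parse_state_policies
  simp only [parse_state_policies, parse_state_policies_alt]
  have hA := pvLoopA_eq_foldl policy_type ((PySem.Str.split? text "\n").getD []) none PySem.Dict.empty
  simp only [Option.map_none] at hA
  rw [hA, pvBlocksP_none]
  have hH : (PySem.List.enumerate ((PySem.Str.split? text "\n").getD []) 0).filterMap
      (fun il => (pvHeaderB il.2).map (fun st => (il.1, il.2, st))) =
        pvHdrs ((PySem.Str.split? text "\n").getD []) 0 := by
    simpa using pvHdrs_eq_enum_filterMap ((PySem.Str.split? text "\n").getD []) 0
  rw [hH]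
  have hZ := pvZip_eq_blocksSpec ((PySem.Str.split? text "\n").getD []).length
      ((PySem.Str.split? text "\n").getD []) le_rfl 0 ((PySem.Str.split? text "\n").getD []) (by simp)
  rw [← hZ, List.foldl_map]
  rfl
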